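-- pv_equiv track=rewrite | github.com/KingAiCodeForge/KingAi_68HC11_C_Compiler | hc11kit.py | _count_free
-- ===== SOURCE A (Python) =====
-- def _count_free(data, fill_byte, min_size):
--     """Count total bytes in free regions >= min_size filled with fill_byte."""
--     total = 0
--     run = 0
--     for b in data:
--         if b == fill_byte:
--             run += 1
--         else:
--             if run >= min_size:
--                 total += run
--             run = 0
--     if run >= min_size:
--         total += run
--     return total
-- ===== SOURCE B (Python) =====
-- def _count_free(data, fill_byte, min_size):
--     """Count total bytes in free regions >= min_size filled with fill_byte."""
--     total = 0
--     i = 0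
--     n = len(data)
--     while i < n:
--         j = i + 1
--         while j < n and data[j] == data[i]:
--             j += 1
--         if data[i] == fill_byte and j - i >= min_size:
--             total += j - i
--         i = j
--     return total
-- ===== Notes on version B (the rewrite author's own statement) =====
-- stated objective: alternative
-- what changed: B scans maximal runs of equal bytes with a run-boundary inner loop and adds qualifying run lengths directly, instead of A's per-byte state machine carrying a fill-run counter with a post-loop flush.
import Mathlib
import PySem

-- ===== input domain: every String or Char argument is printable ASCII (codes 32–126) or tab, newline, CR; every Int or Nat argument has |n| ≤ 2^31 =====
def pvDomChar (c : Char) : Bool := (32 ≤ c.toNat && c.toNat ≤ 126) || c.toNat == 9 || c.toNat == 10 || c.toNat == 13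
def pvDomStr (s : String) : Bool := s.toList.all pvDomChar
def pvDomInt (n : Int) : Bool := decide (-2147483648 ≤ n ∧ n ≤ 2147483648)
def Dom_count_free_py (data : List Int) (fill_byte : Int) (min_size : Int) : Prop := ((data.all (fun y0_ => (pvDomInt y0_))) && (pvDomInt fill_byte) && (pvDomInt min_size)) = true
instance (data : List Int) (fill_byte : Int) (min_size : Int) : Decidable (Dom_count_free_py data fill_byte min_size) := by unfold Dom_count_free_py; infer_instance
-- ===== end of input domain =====

-- B replaces A's per-byte fill-run state machine by a maximal-equal-run scan (alternative decomposition, same cost).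


-- ===== PORT A =====
-- A: per-byte state machine carrying (total, run-of-fill-bytes), flushed at run breaks and at the end.
def countFreeGoA (fb ms : Int) : List Int → Int → Int → Int
  | [], total, run => if run ≥ ms then total + run else total
  | b :: rest, total, run =>
    if b = fb then countFreeGoA fb ms rest total (run + 1)
    else countFreeGoA fb ms rest (if run ≥ ms then total + run else total) 0

def count_free_py (data : List Int) (fill_byte : Int) (min_size : Int) : Int :=
  countFreeGoA fill_byte min_size data 0 0

-- ===== PORT B =====
-- B: scan maximal runs of equal bytes (inner while = takeWhile/dropWhile) and add qualifying lengths.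
def countFreeGoB (fb ms : Int) : List Int → Int
  | [] => 0
  | x :: xs =>
    let run : Int := 1 + ((xs.takeWhile (fun y => y == x)).length : Int)
    (if x = fb ∧ run ≥ ms then run else 0) + countFreeGoB fb ms (xs.dropWhile (fun y => y == x))
termination_by l => l.length
decreasing_by
  simp only [List.length_cons]
  exact Nat.lt_succ_of_le (List.length_dropWhile_le _ _)

def count_free_py_alt (data : List Int) (fill_byte : Int) (min_size : Int) : Int :=
  countFreeGoB fill_byte min_size data

-- ===== PRECONDITION & SPEC =====
def Spec_count_free_py (data : List Int) (fill_byte : Int) (min_size : Int) (out : Int) : Prop := out = count_free_py_alt data fill_byte min_size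
instance (data : List Int) (fill_byte : Int) (min_size : Int) (out : Int) : Decidable (Spec_count_free_py data fill_byte min_size out) := by unfold Spec_count_free_py; infer_instance

-- ===== CLAIM (what is proved, stated in full; the proofs are below) =====
def Claim_equal_count_free_py : Prop := ∀ (data : List Int) (fill_byte : Int) (min_size : Int), Dom_count_free_py data fill_byte min_size → Spec_count_free_py data fill_byte min_size (count_free_py data fill_byte min_size)

-- ===== LEMMAS AND PROOFS =====

theorem countFreeGoA_add (fb ms : Int) (l : List Int) : ∀ (total run : Int),
    countFreeGoA fb ms l total run = total + countFreeGoA fb ms l 0 run := by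
  induction l with
  | nil => intro total run; simp only [countFreeGoA]; split <;> ring
  | cons b rest ih =>
    intro total run
    simp only [countFreeGoA]
    split
    · exact ih total (run + 1)
    · rw [ih _ 0, ih (if run ≥ ms then 0 + run else 0) 0]
      split <;> ring

theorem countFreeGoA_fill (fb ms : Int) (t : List Int) : ∀ (r : List Int) (run : Int),
    (∀ y ∈ t, y = fb) →
    countFreeGoA fb ms (t ++ r) 0 run = countFreeGoA fb ms r 0 (run + t.length) := by
  induction t with
  | nil => intro r run _; simp
  | cons a t ih =>
    intro r run h
    have ha : a = fb := h a (List.mem_cons_self ..)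
    simp only [List.cons_append, countFreeGoA, if_pos ha]
    rw [ih r (run + 1) (fun y hy => h y (List.mem_cons_of_mem _ hy))]
    congr 1
    simp only [List.length_cons]
    push_cast
    ring

theorem countFreeGoA_nonfill (fb ms : Int) (u : List Int) : ∀ (r : List Int),
    (∀ y ∈ u, y ≠ fb) →
    countFreeGoA fb ms (u ++ r) 0 0 = countFreeGoA fb ms r 0 0 := by
  induction u with
  | nil => intro r _; simp
  | cons a u ih =>
    intro r h
    have ha : ¬ (a = fb) := h a (List.mem_cons_self ..)
    simp only [List.cons_append, countFreeGoA, if_neg ha]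
    have hz : (if (0:Int) ≥ ms then (0:Int) + 0 else 0) = 0 := by split <;> ring
    rw [hz]
    exact ih r (fun y hy => h y (List.mem_cons_of_mem _ hy))

theorem countFreeGoA_main (fb ms : Int) : ∀ (n : ℕ) (l : List Int), l.length ≤ n →
    countFreeGoA fb ms l 0 0 = countFreeGoB fb ms l := by
  intro n
  induction n with
  | zero =>
    intro l hl
    have : l = [] := List.eq_nil_of_length_eq_zero (Nat.le_zero.mp hl)
    subst this
    simp [countFreeGoA, countFreeGoB]
  | succ n ih =>
    intro l hl
    match l with
    | [] => simp [countFreeGoA, countFreeGoB]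
    | x :: xs =>
      set t := xs.takeWhile (fun y => y == x) with ht
      set r := xs.dropWhile (fun y => y == x) with hr
      have hxs : t ++ r = xs := List.takeWhile_append_dropWhile
      have hrlen : r.length ≤ n := by
        have h2 := List.length_dropWhile_le (fun y => y == x) xs
        rw [← hr] at h2
        simp only [List.length_cons] at hl
        omega
      have ht_mem : ∀ y ∈ t, y = x := by
        intro y hy
        have := List.mem_takeWhile_imp (ht ▸ hy)
        simpa using this
      have hB : countFreeGoB fb ms (x :: xs) =
          (if x = fb ∧ (1 + (t.length : Int)) ≥ ms then 1 + (t.length : Int) else 0) +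
            countFreeGoB fb ms r := by
        rw [countFreeGoB]
      by_cases hx : x = fb
      · -- a maximal run of fill bytes of length 1 + t.length
        subst hx
        have step : countFreeGoA x ms (x :: xs) 0 0 =
            countFreeGoA x ms r 0 (1 + (t.length : Int)) := by
          simp only [countFreeGoA, if_true, zero_add]
          rw [← hxs, countFreeGoA_fill x ms t r 1 ht_mem]
        rw [step, hB]
        have hrr := ih r hrlen
        match hr2 : r, hrr, hr with
        | [], _, _ =>
          simp only [countFreeGoA, countFreeGoB, true_and, add_zero]
          split_ifs <;> ring
        | y :: r', hrr, hr =>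
          have hy : ¬ (y = x) := by
            have h2 := List.head?_dropWhile_not (fun y => y == x) xs
            rw [← hr] at h2
            simpa using h2
          simp only [countFreeGoA, if_neg hy] at hrr ⊢
          rw [countFreeGoA_add] at hrr ⊢
          have hz : (if (0:Int) ≥ ms then (0:Int) + 0 else 0) = 0 := by split <;> ring
          rw [hz] at hrr
          simp only [zero_add] at hrr
          rw [← hrr]
          simp only [true_and]
          split_ifs <;> ring
      · -- a maximal run of non-fill bytes contributes nothing on both sides
        rw [hB, ← ih r hrlen]
        have hcond : ¬ (x = fb ∧ (1 + (t.length : Int)) ≥ ms) := fun hc => hx hc.1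
        rw [if_neg hcond, zero_add]
        have hsplit : x :: xs = (x :: t) ++ r := by rw [List.cons_append, hxs]
        rw [hsplit]
        refine countFreeGoA_nonfill fb ms (x :: t) r ?_
        intro y hy
        have hyx : y = x := by
          rcases List.mem_cons.mp hy with h | h
          · exact h
          · exact ht_mem y h
        rw [hyx]
        exact hx
theorem count_free_py_spec : Claim_equal_count_free_py := by
  intro data fb ms _
  unfold Spec_count_free_py count_free_py count_free_py_alt
  exact countFreeGoA_main fb ms data.length data (le_refl _)
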